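-- pv_equiv track=rewrite | github.com/MelanieRosenberg/document-part-classifier | src/models/transformer_classifier.py | format_document
-- ===== SOURCE A (Python) =====
-- from typing import List, Tuple, Dict, Optional, Union
--
-- def format_document(lines: List[str], predictions: List[str]) -> str:
--     """
--     Format a document with XML tags based on predictions.
--
--     Args:
--         lines: List of text lines
--         predictions: List of predicted tags
--
--     Returns:
--         Formatted document string with XML tags
--     """
--     result = []
--     current_tag = None
--     current_content = []
--
--     for line, tag in zip(lines, predictions):
--         if tag != current_tag:
--             # Close previous tag if exists
--             if current_tag is not None:
--                 result.append(f"<{current_tag}>")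
--                 result.extend(current_content)
--                 result.append(f"</{current_tag}>")
--
--             # Start new tag
--             current_tag = tag
--             current_content = [line]
--         else:
--             # Continue with current tag
--             current_content.append(line)
--
--     # Add the last section
--     if current_tag is not None:
--         result.append(f"<{current_tag}>")
--         result.extend(current_content)
--         result.append(f"</{current_tag}>")
--
--     return "\n".join(result)
-- ===== SOURCE B (Python) =====
-- def format_document(lines, predictions):
--     """Stateless index pass: emit an opening tag wherever the tag differs from
--     its left neighbour and a closing tag wherever it differs from its right
--     neighbour; no run buffering or current-tag state machine."""
--     n = min(len(lines), len(predictions))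
--     pieces = []
--     for i in range(n):
--         if i == 0 or predictions[i - 1] != predictions[i]:
--             pieces.append(f"<{predictions[i]}>")
--         pieces.append(lines[i])
--         if i == n - 1 or predictions[i + 1] != predictions[i]:
--             pieces.append(f"</{predictions[i]}>")
--     return "\n".join(pieces)
-- ===== Notes on version B (the rewrite author's own statement) =====
-- stated objective: alternative
-- what changed: Replaces A's run-buffering state machine (current_tag/current_content with duplicated flush code) by a stateless index pass that emits an opening tag where the tag differs from its left neighbour and a closing tag where it differs from its right neighbour.
import Mathlib
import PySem

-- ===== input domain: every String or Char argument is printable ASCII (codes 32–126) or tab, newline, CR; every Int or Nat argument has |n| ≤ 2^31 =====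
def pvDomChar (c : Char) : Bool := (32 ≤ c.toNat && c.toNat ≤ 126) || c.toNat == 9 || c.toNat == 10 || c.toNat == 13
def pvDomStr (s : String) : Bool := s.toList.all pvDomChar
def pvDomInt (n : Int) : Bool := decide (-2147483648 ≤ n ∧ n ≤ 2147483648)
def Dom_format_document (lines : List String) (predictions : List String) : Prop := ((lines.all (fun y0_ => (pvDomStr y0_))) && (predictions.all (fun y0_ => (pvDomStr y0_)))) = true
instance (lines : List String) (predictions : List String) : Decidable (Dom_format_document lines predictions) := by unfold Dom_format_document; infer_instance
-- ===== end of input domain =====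

-- B replaces A's run-buffering state machine (current_tag/current_content with a duplicated
-- flush) by a stateless index pass emitting open/close tags at left/right tag changes; same cost.

-- ===== PORT A =====
-- One loop step of A: state is (result, current_tag, current_content).
def pvStepA (st : List String × Option String × List String) (lt : String × String) :
    List String × Option String × List String :=
  let result := st.1
  let currentTag := st.2.1
  let currentContent := st.2.2
  let line := lt.1
  let tag := lt.2
  if some tag ≠ currentTag then
    let result :=
      match currentTag with
      | none => result
      | some t => result ++ ["<" ++ t ++ ">"] ++ currentContent ++ ["</" ++ t ++ ">"]
    (result, some tag, [line])
  else
    (result, currentTag, currentContent ++ [line])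

-- A's trailing "add the last section" flush.
def pvFinalize (st : List String × Option String × List String) : List String :=
  match st.2.1 with
  | none => st.1
  | some t => st.1 ++ ["<" ++ t ++ ">"] ++ st.2.2 ++ ["</" ++ t ++ ">"]

def format_document (lines : List String) (predictions : List String) : String :=
  PySem.Str.join "\n" (pvFinalize ((lines.zip predictions).foldl pvStepA ([], none, [])))

-- ===== PORT B =====
-- Source B's index loop over range(n); every index Source B actually evaluates is in range,
-- so lines[i] / predictions[i±1] are ported with getD (the default is never used).
def format_document_alt (lines : List String) (predictions : List String) : String :=
  let n := min lines.length predictions.length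
  let pieces := (List.range n).foldl (fun acc i =>
    let acc := if i = 0 ∨ predictions.getD (i - 1) "" ≠ predictions.getD i "" then
        acc ++ ["<" ++ predictions.getD i "" ++ ">"] else acc
    let acc := acc ++ [lines.getD i ""]
    if i = n - 1 ∨ predictions.getD (i + 1) "" ≠ predictions.getD i "" then
        acc ++ ["</" ++ predictions.getD i "" ++ ">"] else acc) []
  PySem.Str.join "\n" pieces

-- ===== PRECONDITION & SPEC =====
def Spec_format_document (lines : List String) (predictions : List String) (out : String) : Prop := out = format_document_alt lines predictions
instance (lines : List String) (predictions : List String) (out : String) : Decidable (Spec_format_document lines predictions out) := by unfold Spec_format_document; infer_instance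

-- ===== CLAIM (what is proved, stated in full; the proofs are below) =====
def Claim_equal_format_document : Prop := ∀ (lines : List String) (predictions : List String), Dom_format_document lines predictions → Spec_format_document lines predictions (format_document lines predictions)

-- ===== LEMMAS AND PROOFS =====

def pvOpen (t : String) : String := "<" ++ t ++ ">"
def pvClose (t : String) : String := "</" ++ t ++ ">"

-- The list of strings Source B's iteration i appends.
def pvBlock (lines predictions : List String) (n i : Nat) : List String :=
  (if i = 0 ∨ predictions.getD (i - 1) "" ≠ predictions.getD i "" then
      [pvOpen (predictions.getD i "")] else [])
  ++ [lines.getD i ""]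
  ++ (if i = n - 1 ∨ predictions.getD (i + 1) "" ≠ predictions.getD i "" then
      [pvClose (predictions.getD i "")] else [])

-- Same block with the left-neighbour comparison at i = 0 made against an explicit prev tag.
def pvBlkP (lines predictions : List String) (prev : Option String) (n i : Nat) : List String :=
  (if (if i = 0 then prev ≠ some (predictions.getD i "")
       else predictions.getD (i - 1) "" ≠ predictions.getD i "") then
      [pvOpen (predictions.getD i "")] else [])
  ++ [lines.getD i ""]
  ++ (if i = n - 1 ∨ predictions.getD (i + 1) "" ≠ predictions.getD i "" then
      [pvClose (predictions.getD i "")] else [])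

-- Structural (list-recursion) form of B's output, carrying the previous tag.
def pvB : List String → List String → Option String → List String
  | l :: ls, t :: ts, prev =>
      (if prev ≠ some t then [pvOpen t] else []) ++ [l] ++
      (if min ls.length ts.length = 0 ∨ ts.getD 0 "" ≠ t then [pvClose t] else []) ++
      pvB ls ts (some t)
  | _, _, _ => []

-- What A's remaining loop plus final flush emits, given the current tag (content already emitted).
def pvTail : List (String × String) → String → List String
  | [], t => [pvClose t]
  | (l, t') :: rest, t =>
      if t' = t then l :: pvTail rest t
      else pvClose t :: pvOpen t' :: l :: pvTail rest t'

lemma pvBlock_eq_blkP (lines predictions : List String) (n i : Nat) :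
    pvBlock lines predictions n i = pvBlkP lines predictions none n i := by
  by_cases h : i = 0 <;> simp [pvBlock, pvBlkP, h]

lemma pvFoldB (lines predictions : List String) (n : Nat) (acc : List String) :
    (List.range n).foldl (fun acc i =>
      let acc := if i = 0 ∨ predictions.getD (i - 1) "" ≠ predictions.getD i "" then
          acc ++ ["<" ++ predictions.getD i "" ++ ">"] else acc
      let acc := acc ++ [lines.getD i ""]
      if i = n - 1 ∨ predictions.getD (i + 1) "" ≠ predictions.getD i "" then
          acc ++ ["</" ++ predictions.getD i "" ++ ">"] else acc) acc
    = acc ++ (List.range n).flatMap (pvBlock lines predictions n) := by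
  have hbody : (fun (acc : List String) i =>
      let acc := if i = 0 ∨ predictions.getD (i - 1) "" ≠ predictions.getD i "" then
          acc ++ ["<" ++ predictions.getD i "" ++ ">"] else acc
      let acc := acc ++ [lines.getD i ""]
      if i = n - 1 ∨ predictions.getD (i + 1) "" ≠ predictions.getD i "" then
          acc ++ ["</" ++ predictions.getD i "" ++ ">"] else acc)
      = (fun acc i => acc ++ pvBlock lines predictions n i) := by
    funext acc i
    simp only [pvBlock, pvOpen, pvClose]
    split_ifs <;> simp
  rw [hbody, PySem.List.foldl_append_eq_flatMap]

lemma pvFlatMap_congr {α β : Type} (l : List α) (f g : α → List β)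
    (h : ∀ a ∈ l, f a = g a) : l.flatMap f = l.flatMap g := by
  induction l with
  | nil => rfl
  | cons x xs ih =>
      simp only [List.flatMap_cons, h x (List.mem_cons_self), ih (fun a ha => h a (List.mem_cons_of_mem _ ha))]

lemma pvShift (l t : String) (ls ts : List String) (prev : Option String) (m i : Nat)
    (hi : i < m) :
    pvBlkP (l :: ls) (t :: ts) prev (m + 1) (i + 1) = pvBlkP ls ts (some t) m i := by
  cases i with
  | zero =>
      have he : (1 = m) = (0 = m - 1) := propext (by omega)
      simp [pvBlkP, he]
  | succ j =>
      have he : (j + 1 + 1 = m) = (j + 1 = m - 1) := propext (by omega)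
      simp [pvBlkP, he]

lemma pvL : ∀ (ls ts : List String) (prev : Option String),
    (List.range (min ls.length ts.length)).flatMap
      (pvBlkP ls ts prev (min ls.length ts.length)) = pvB ls ts prev := by
  intro ls
  induction ls with
  | nil => intro ts prev; simp [pvB]
  | cons l ls ih =>
      intro ts prev
      cases ts with
      | nil => simp [pvB]
      | cons t ts =>
          have hmin : min (l :: ls).length (t :: ts).length = min ls.length ts.length + 1 := by
            simp [Nat.succ_min_succ]
          rw [hmin, List.range_succ_eq_map, List.flatMap_cons, List.flatMap_map]
          have hcongr : (List.range (min ls.length ts.length)).flatMap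
              (fun a => pvBlkP (l :: ls) (t :: ts) prev (min ls.length ts.length + 1) a.succ)
              = (List.range (min ls.length ts.length)).flatMap
                  (pvBlkP ls ts (some t) (min ls.length ts.length)) := by
            apply pvFlatMap_congr
            intro i hi
            have : i < min ls.length ts.length := List.mem_range.mp hi
            exact pvShift l t ls ts prev _ i this
          rw [hcongr, ih ts (some t)]
          have hm0 : (0 = min ls.length ts.length) = (min ls.length ts.length = 0) :=
            propext eq_comm
          simp only [pvBlkP, pvB, pvOpen, pvClose, Nat.add_sub_cancel, hm0,
            List.getD_cons_zero, List.getD_cons_succ]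
          split_ifs <;> simp

lemma pvLoopA (pairs : List (String × String)) :
    ∀ (res cs : List String) (t : String),
      pvFinalize (pairs.foldl pvStepA (res, some t, cs)) =
        res ++ pvOpen t :: (cs ++ pvTail pairs t) := by
  induction pairs with
  | nil => intro res cs t; simp [pvFinalize, pvTail, pvOpen, pvClose]
  | cons hd rest ih =>
      intro res cs t
      obtain ⟨l, t'⟩ := hd
      by_cases h : t' = t
      · subst h
        have hstep : pvStepA (res, some t', cs) (l, t') = (res, some t', cs ++ [l]) := by
          simp [pvStepA]
        rw [List.foldl_cons, hstep, ih]
        simp [pvTail]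
      · have hstep : pvStepA (res, some t, cs) (l, t') =
            (res ++ ["<" ++ t ++ ">"] ++ cs ++ ["</" ++ t ++ ">"], some t', [l]) := by
          simp [pvStepA, h]
        rw [List.foldl_cons, hstep, ih]
        simp [pvTail, h, pvOpen, pvClose]

lemma pvAZ : ∀ (ls ts : List String) (t : String),
    pvTail (ls.zip ts) t =
      (if min ls.length ts.length = 0 ∨ ts.getD 0 "" ≠ t then [pvClose t] else []) ++
        pvB ls ts (some t) := by
  intro ls
  induction ls with
  | nil => intro ts t; simp [pvTail, pvB]
  | cons l ls ih =>
      intro ts t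
      cases ts with
      | nil => simp [pvTail, pvB]
      | cons t' ts =>
          by_cases h : t' = t
          · subst h
            simp only [List.zip_cons_cons, pvTail, ih ts t']
            simp [pvB]
          · simp only [List.zip_cons_cons, pvTail, if_neg h, ih ts t']
            simp [pvB, h, Ne.symm h]

-- ===== VERDICT (by name: the statement is the Claim_ definition above) =====
theorem format_document_spec : Claim_equal_format_document := by
  intro lines predictions _
  unfold Spec_format_document format_document format_document_alt
  cases lines with
  | nil => simp [pvFinalize]
  | cons l ls =>
      cases predictions with
      | nil => simp [pvFinalize]
      | cons t ts =>
          have hstep : pvStepA ([], none, []) (l, t) = ([], some t, [l]) := by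
            simp [pvStepA]
          rw [List.zip_cons_cons, List.foldl_cons, hstep, pvLoopA, pvAZ]
          simp only [pvFoldB, List.nil_append]
          have hblk : (List.range (min (l :: ls).length (t :: ts).length)).flatMap
              (pvBlock (l :: ls) (t :: ts) (min (l :: ls).length (t :: ts).length))
              = pvB (l :: ls) (t :: ts) none := by
            rw [pvFlatMap_congr _ _ _ (fun i _ => pvBlock_eq_blkP (l :: ls) (t :: ts) _ i)]
            exact pvL (l :: ls) (t :: ts) none
          rw [hblk]
          by_cases h0 : min ls.length ts.length = 0 ∨ ts.getD 0 "" ≠ t <;>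
            simp [pvB, pvOpen, pvClose]
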